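-- pv_equiv track=rewrite | github.com/sroet/AoC2024_python | 07/solution.py | part_1
-- ===== SOURCE A (Python) =====
-- def solve_equation(test, values, part2=False):
--     if len(values) == 1:
--         return values[0] == test
--     val = values.pop()
--     if val > test:
--         return False
--     temp_values = values.copy()
--     temp_values[-1] *= val
--     out = solve_equation(test, temp_values, part2)
--     if out:
--         return out
--     temp_values = values.copy()
--     temp_values[-1] += val
--     out = solve_equation(test, temp_values, part2)
--     if out or not part2:
--         return out
--     temp_values = values.copy()
--     temp_values[-1] = int(str(val) + str(values[-1]))
--     return solve_equation(test, temp_values, part2)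
--
-- def part_1(data):
--     out = 0
--     false_list = []
--     for test, values in data:
--         if solve_equation(test, values[::-1].copy()):
--             out += test
--         else:
--             false_list.append((test, values))
--     return out, false_list
-- ===== SOURCE B (Python) =====
-- def part_1(data):
--     total = 0
--     false_list = []
--     for test, values in data:
--         frontier = [values[0]]
--         for x in values[1:]:
--             live = [a for a in frontier if a <= test]
--             frontier = [a * x for a in live] + [a + x for a in live]
--         if test in frontier:
--             total += test
--         else:
--             false_list.append((test, values))
--     return total, false_list
-- ===== Notes on version B (the rewrite author's own statement) =====
-- stated objective: alternative
-- what changed: Replaces A's recursive pop-and-copy search over the reversed operand list (two list copies per branch) by an iterative breadth-first frontier of reachable accumulated values swept once over the operands, with the same <= test pruning.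
import Mathlib
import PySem

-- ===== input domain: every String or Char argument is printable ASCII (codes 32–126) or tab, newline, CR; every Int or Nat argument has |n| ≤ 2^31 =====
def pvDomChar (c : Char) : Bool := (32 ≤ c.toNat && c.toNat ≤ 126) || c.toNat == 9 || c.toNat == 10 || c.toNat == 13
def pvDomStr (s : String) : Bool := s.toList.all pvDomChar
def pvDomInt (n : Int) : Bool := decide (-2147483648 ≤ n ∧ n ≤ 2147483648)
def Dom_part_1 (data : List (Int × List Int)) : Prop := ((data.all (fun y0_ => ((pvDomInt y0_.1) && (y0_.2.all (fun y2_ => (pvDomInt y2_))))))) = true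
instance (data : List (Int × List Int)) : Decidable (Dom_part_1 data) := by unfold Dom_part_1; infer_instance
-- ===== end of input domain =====

-- B replaces A's recursive pop-and-copy search by an iterative frontier sweep over the
-- operands (one forward pass keeping the list of reachable accumulated values); objective: alternative.

-- ===== PORT A =====
-- length lemma used by solveEq's termination proof
theorem pv_len_lt (values : List Int) (z : Int) (hne : ¬ values.length = 1)
    (hnil : values ≠ []) :
    ((values.dropLast).dropLast ++ [z]).length < values.length := by
  rcases values with _ | ⟨a, l⟩
  · exact absurd rfl hnil
  · simp only [List.length_append, List.length_dropLast, List.length_cons,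
      List.length_nil] at *
    omega

-- transliteration of solve_equation (part2=False path); the `none` branch is pop from
-- an empty list, which raises IndexError in Python — unreachable under Pre_part_1
def solveEq (test : Int) (values : List Int) : Bool :=
  if values.length = 1 then values.headD 0 == test
  else
    match hL : values.getLast? with
    | none => false
    | some val =>
      let rest := values.dropLast
      if val > test then false
      else
        let t1 := rest.dropLast ++ [rest.getLastD 0 * val]
        let out := solveEq test t1
        if out then out
        else
          let t2 := rest.dropLast ++ [rest.getLastD 0 + val]
          solveEq test t2
termination_by values.length
decreasing_by
  all_goals
    exact pv_len_lt values _ (by assumption) (by rintro rfl; simp at hL)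

def part_1 (data : List (Int × List Int)) : Int × (List (Int × List Int)) :=
  data.foldl
    (fun acc p =>
      if solveEq p.1 (p.2.reverse) then (acc.1 + p.1, acc.2)
      else (acc.1, acc.2 ++ [p]))
    (0, [])

-- ===== PORT B =====
-- one frontier step: keep accumulators ≤ test, extend each with * x and + x
def frontStep (test : Int) (f : List Int) (x : Int) : List Int :=
  let live := f.filter (fun a => a ≤ test)
  live.map (fun a => a * x) ++ live.map (fun a => a + x)

def part_1_alt (data : List (Int × List Int)) : Int × (List (Int × List Int)) :=
  data.foldl
    (fun acc p =>
      match p.2 with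
      | [] => acc   -- values[0] raises IndexError in Python; unreachable under Pre_part_1
      | v :: rest =>
        let frontier := rest.foldl (frontStep p.1) [v]
        if frontier.contains p.1 then (acc.1 + p.1, acc.2)
        else (acc.1, acc.2 ++ [p]))
    (0, [])

-- ===== PRECONDITION & SPEC =====
-- Pre_ excludes items with an empty operand list, on which A raises IndexError (pop from empty list)
def Pre_part_1 (data : List (Int × List Int)) : Prop :=
  ∀ p ∈ data, p.2 ≠ []
instance (data : List (Int × List Int)) : Decidable (Pre_part_1 data) := by unfold Pre_part_1; infer_instance

def pvWitness_part_1 : (List (Int × List Int)) := [(190, [10, 19]), (83, [17, 5]), (292, [11, 6, 16, 20])]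

def Spec_part_1 (data : List (Int × List Int)) (out : Int × (List (Int × List Int))) : Prop := out = part_1_alt data
instance (data : List (Int × List Int)) (out : Int × (List (Int × List Int))) : Decidable (Spec_part_1 data out) := by unfold Spec_part_1; infer_instance

-- ===== CLAIM (what is proved, stated in full; the proofs are below) =====
def Claim_equal_part_1 : Prop := ∀ (data : List (Int × List Int)), Dom_part_1 data → Pre_part_1 data → Spec_part_1 data (part_1 data)

-- ===== LEMMAS AND PROOFS =====

-- the common reference function: accumulator-first recursion over the operand list
def gRef (test acc : Int) : List Int → Bool
  | [] => acc == test
  | x :: xs => if acc > test then false else gRef test (acc * x) xs || gRef test (acc + x) xs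

theorem solveEq_eq_gRef (test : Int) (rest : List Int) : ∀ acc : Int,
    solveEq test (rest.reverse ++ [acc]) = gRef test acc rest := by
  induction rest with
  | nil => intro acc; simp [solveEq, gRef]
  | cons x xs ih =>
    intro acc
    rw [solveEq]
    have hne : ¬ ((x :: xs).reverse ++ [acc]).length = 1 := by simp
    have hlast : ((x :: xs).reverse ++ [acc]).getLast? = some acc := by
      simp [List.getLast?_append]
    have hdrop : ((x :: xs).reverse ++ [acc]).dropLast = xs.reverse ++ [x] := by
      simp [List.dropLast_append_of_ne_nil]
    rw [if_neg hne]
    split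
    · simp_all
    · rename_i val hv
      rw [hlast] at hv; injection hv with hv; subst hv
      simp only [hdrop, List.dropLast_concat, List.getLastD_concat]
      rw [gRef]
      split
      · rfl
      · rw [ih (x * acc), ih (x + acc), Int.mul_comm x acc, Int.add_comm x acc]
        rcases gRef test (acc * x) xs <;> simp

theorem filter_any_or (p q1 q2 : Int → Bool) (l : List Int) :
    ((l.filter p).any q1 || (l.filter p).any q2)
      = l.any (fun a => p a && (q1 a || q2 a)) := by
  induction l with
  | nil => rfl
  | cons b l ih =>
    rw [List.filter_cons]
    by_cases hb : p b = true
    · cases hq1 : q1 b <;> cases hq2 : q2 b <;>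
        simp [hb, hq1, hq2, ← ih]
    · simp [hb, ← ih]

theorem frontStep_any (test x : Int) (q : Int → Bool) (f : List Int) :
    ((frontStep test f x).any q)
      = f.any (fun a => decide (a ≤ test) && (q (a * x) || q (a + x))) := by
  simp only [frontStep, List.any_append, List.any_map]
  exact filter_any_or _ _ _ f

theorem foldl_frontStep_contains (test : Int) (xs : List Int) : ∀ f : List Int,
    (xs.foldl (frontStep test) f).contains test = f.any (fun a => gRef test a xs) := by
  induction xs with
  | nil =>
    intro f
    simp only [List.foldl_nil, gRef]
    induction f with
    | nil => rfl
    | cons b f ihf =>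
      simp only [List.contains_cons, List.any_cons, ihf]
      congr 1
      rw [Bool.eq_iff_iff]
      simp only [beq_iff_eq]
      exact eq_comm
  | cons x xs ih =>
    intro f
    rw [List.foldl_cons, ih, frontStep_any]
    congr 1
    funext a
    rw [gRef]
    by_cases hb : a ≤ test
    · have h2 : ¬ a > test := by omega
      simp [hb, h2]
    · have h2 : a > test := by omega
      simp [hb, h2]

theorem solve_agree (test : Int) (v : Int) (rest : List Int) :
    solveEq test ((v :: rest).reverse) = ((rest.foldl (frontStep test) [v]).contains test) := by
  rw [foldl_frontStep_contains]
  have hrev : (v :: rest).reverse = rest.reverse ++ [v] := by simp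
  rw [hrev, solveEq_eq_gRef]
  simp

theorem fold_tail_eq : ∀ (ps : List (Int × List Int)), Pre_part_1 ps →
    ∀ acc : Int × (List (Int × List Int)),
    ps.foldl (fun acc p => if solveEq p.1 (p.2.reverse) then (acc.1 + p.1, acc.2)
                           else (acc.1, acc.2 ++ [p])) acc
    = ps.foldl (fun acc p => match p.2 with
        | [] => acc
        | v :: rest =>
          let frontier := rest.foldl (frontStep p.1) [v]
          if frontier.contains p.1 then (acc.1 + p.1, acc.2)
          else (acc.1, acc.2 ++ [p])) acc := by
  intro ps
  induction ps with
  | nil => intro _ acc; rfl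
  | cons q qs ih2 =>
    intro hpre acc
    have hq : q.2 ≠ [] := hpre q (List.mem_cons_self)
    rcases q with ⟨t, vs⟩
    rcases vs with _ | ⟨v, rest⟩
    · exact absurd rfl hq
    · simp only [List.foldl_cons]
      rw [show (solveEq t ((v :: rest).reverse)) = ((rest.foldl (frontStep t) [v]).contains t)
        from solve_agree t v rest]
      exact ih2 (fun r hr => hpre r (List.mem_cons_of_mem _ hr)) _

-- ===== VERDICT (by name: the statement is the Claim_ definition above) =====
theorem part_1_spec : Claim_equal_part_1 := by
  intro data _ hpre
  unfold Spec_part_1 part_1 part_1_alt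
  exact fold_tail_eq data hpre (0, [])
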